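-- pv_equiv track=rewrite | github.com/se0nShine/Embedded20th_Humanoid_competition | python.py | detect_object
-- ===== SOURCE A (Python) =====
-- viewSize = (320, int(320 / 1.333))
--
-- def detect_object(rects):
--     w_view = viewSize[0]
--     h_view = viewSize[1]
--     for rect in rects:
--         center_point = (int(rect['cx']), int(rect['cy']))
--
--     if (center_point[0] <= int(w_view*0.33)) and (center_point[1] <= int(h_view*0.33)):
--         return 181
--     elif(center_point[0] <= int(w_view*0.33*2)) and (center_point[1] <= int(h_view*0.33)):
--         return 182
--     elif (center_point[0] <= int(w_view)) and (center_point[1] <= int(h_view * 0.33)):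
--         return 183
--     elif (center_point[0] <= int(w_view * 0.33)) and (center_point[1] <= int(h_view * 0.33*2)):
--         return 184
--     elif (center_point[0] <= int(w_view * 0.33 * 2)) and (center_point[1] <= int(h_view * 0.33*2)):
--         return 185
--     elif (center_point[0] <= int(w_view)) and (center_point[1] <= int(h_view * 0.33*2)):
--         return 186
--     elif (center_point[0] <= int(w_view * 0.33)) and (center_point[1] <= int(h_view)):
--         return 187
--     elif (center_point[0] <= int(w_view * 0.33 * 2)) and (center_point[1] <= int(h_view)):
--         return 188
--     elif (center_point[0] <= int(w_view)) and (center_point[1] <= int(h_view)):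
--         return 189
-- ===== SOURCE B (Python) =====
-- viewSize = (320, int(320 / 1.333))
--
-- def detect_object(rects):
--     w_view = viewSize[0]
--     h_view = viewSize[1]
--     for rect in rects:
--         center_point = (int(rect['cx']), int(rect['cy']))
--
--     col = next((i for i, t in enumerate(
--         (int(w_view * 0.33), int(w_view * 0.33 * 2), int(w_view)))
--         if center_point[0] <= t), None)
--     row = next((i for i, t in enumerate(
--         (int(h_view * 0.33), int(h_view * 0.33 * 2), int(h_view)))
--         if center_point[1] <= t), None)
--     if col is None or row is None:
--         return None
--     return 181 + 3 * row + col
-- ===== Notes on version B (the rewrite author's own statement) =====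
-- stated objective: simpler
-- what changed: B keeps A's last-rect loop but replaces the 9-branch elif chain with a column index and a row index (first threshold the coordinate fits under) combined by the closed form 181 + 3*row + col.
-- outside the precondition, e.g. on detect_object([{'cx': 400, 'cy': 10}]): A returns None, B returns None
import Mathlib
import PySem

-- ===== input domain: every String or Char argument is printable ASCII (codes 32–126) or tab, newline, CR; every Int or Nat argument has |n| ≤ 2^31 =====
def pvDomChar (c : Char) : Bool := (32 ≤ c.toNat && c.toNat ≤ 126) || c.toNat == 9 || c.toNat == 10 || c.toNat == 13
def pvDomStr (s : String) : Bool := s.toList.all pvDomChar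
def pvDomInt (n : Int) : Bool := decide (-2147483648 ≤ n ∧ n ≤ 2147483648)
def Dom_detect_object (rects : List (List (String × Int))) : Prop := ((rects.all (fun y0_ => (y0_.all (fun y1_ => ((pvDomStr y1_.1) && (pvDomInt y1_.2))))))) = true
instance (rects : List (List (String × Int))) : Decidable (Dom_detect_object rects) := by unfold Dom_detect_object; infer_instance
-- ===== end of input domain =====

-- B replaces A's 9-branch elif chain by a column/row threshold index and the closed form
-- 181 + 3*row + col; the last-rect loop is kept unchanged (objective: simpler).
-- Float threshold constants are precomputed exactly: w_view = 320, h_view = int(320/1.333) = 240,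
-- int(320*0.33) = 105, int(320*0.33*2) = 211, int(240*0.33) = 79, int(240*0.33*2) = 158.

-- ===== PORT A =====
-- the 'for rect in rects' loop: center_point after the loop; none = NameError (empty) or KeyError
def pvLastCenter : List (List (String × Int)) → Option (Int × Int) → Option (Int × Int)
  | [], acc => acc
  | r :: rs, _ =>
    match (PySem.Dict.mk r).get? "cx", (PySem.Dict.mk r).get? "cy" with
    | some cx, some cy => pvLastCenter rs (some (cx, cy))
    | _, _ => none

-- the elif chain of A (returns 0 where Python falls through returning None; excluded by Pre_)
def pvClassifyA (x y : Int) : Int :=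
  if x ≤ 105 ∧ y ≤ 79 then 181
  else if x ≤ 211 ∧ y ≤ 79 then 182
  else if x ≤ 320 ∧ y ≤ 79 then 183
  else if x ≤ 105 ∧ y ≤ 158 then 184
  else if x ≤ 211 ∧ y ≤ 158 then 185
  else if x ≤ 320 ∧ y ≤ 158 then 186
  else if x ≤ 105 ∧ y ≤ 240 then 187
  else if x ≤ 211 ∧ y ≤ 240 then 188
  else if x ≤ 320 ∧ y ≤ 240 then 189
  else 0

def detect_object (rects : List (List (String × Int))) : Int :=
  match pvLastCenter rects none with
  | none => 0                      -- NameError / KeyError; excluded by Pre_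
  | some cp => pvClassifyA cp.1 cp.2

-- ===== PORT B =====
-- first threshold index the coordinate fits under (Python's next(...enumerate...))
def pvIdx3 (v t1 t2 t3 : Int) : Option Int :=
  if v ≤ t1 then some 0 else if v ≤ t2 then some 1 else if v ≤ t3 then some 2 else none

def detect_object_alt (rects : List (List (String × Int))) : Int :=
  match pvLastCenter rects none with
  | none => 0                      -- NameError / KeyError; excluded by Pre_
  | some cp =>
    match pvIdx3 cp.1 105 211 320, pvIdx3 cp.2 79 158 240 with
    | some c, some r => 181 + 3 * r + c
    | _, _ => 0                    -- Python B returns None here; excluded by Pre_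

-- ===== PRECONDITION & SPEC =====
-- Pre_ excludes: empty rects (NameError), a rect missing key 'cx'/'cy' (KeyError), and a last
-- center beyond the last threshold on either axis (cx > 320 or cy > 240), where A falls off the
-- elif chain and returns None, not an int.
def Pre_detect_object (rects : List (List (String × Int))) : Prop :=
  rects ≠ [] ∧
  (∀ r ∈ rects, ((PySem.Dict.mk r).get? "cx").isSome ∧ ((PySem.Dict.mk r).get? "cy").isSome) ∧
  (∀ r ∈ rects.getLast?.toList,
      ((PySem.Dict.mk r).get? "cx").getD 0 ≤ 320 ∧ ((PySem.Dict.mk r).get? "cy").getD 0 ≤ 240)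
instance (rects : List (List (String × Int))) : Decidable (Pre_detect_object rects) := by
  unfold Pre_detect_object; infer_instance

def pvWitness_detect_object : (List (List (String × Int))) := [[("cx", 150), ("cy", 30)]]

def Spec_detect_object (rects : List (List (String × Int))) (out : Int) : Prop := out = detect_object_alt rects
instance (rects : List (List (String × Int))) (out : Int) : Decidable (Spec_detect_object rects out) := by unfold Spec_detect_object; infer_instance

-- ===== CLAIM (what is proved, stated in full; the proofs are below) =====
def Claim_equal_detect_object : Prop := ∀ (rects : List (List (String × Int))), Dom_detect_object rects → Pre_detect_object rects → Spec_detect_object rects (detect_object rects)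

-- ===== LEMMAS AND PROOFS =====

-- under Pre_'s key condition, the loop state is the last rect's center
lemma pvLastCenter_some : ∀ (rects : List (List (String × Int))) (acc : Option (Int × Int)),
    rects ≠ [] →
    (∀ r ∈ rects, ((PySem.Dict.mk r).get? "cx").isSome ∧ ((PySem.Dict.mk r).get? "cy").isSome) →
    ∃ r, rects.getLast? = some r ∧
      pvLastCenter rects acc =
        some (((PySem.Dict.mk r).get? "cx").getD 0, ((PySem.Dict.mk r).get? "cy").getD 0) := by
  intro rects
  induction rects with
  | nil => intro _ h; exact absurd rfl h
  | cons r rs ih =>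
    intro acc _ hk
    obtain ⟨hx, hy⟩ := hk r (List.mem_cons_self ..)
    obtain ⟨cx, hcx⟩ := Option.isSome_iff_exists.mp hx
    obtain ⟨cy, hcy⟩ := Option.isSome_iff_exists.mp hy
    cases rs with
    | nil =>
      exact ⟨r, rfl, by simp [pvLastCenter, hcx, hcy]⟩
    | cons r2 rs2 =>
      obtain ⟨rl, hl, hv⟩ := ih (some (cx, cy)) (by simp)
        (fun q hq => hk q (List.mem_cons_of_mem _ hq))
      exact ⟨rl, by simpa using hl, by rw [← hv]; simp [pvLastCenter, hcx, hcy]⟩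

lemma classify_eq (x y : Int) (hx : x ≤ 320) (hy : y ≤ 240) :
    pvClassifyA x y =
      (match pvIdx3 x 105 211 320, pvIdx3 y 79 158 240 with
       | some c, some r => 181 + 3 * r + c
       | _, _ => 0) := by
  unfold pvClassifyA pvIdx3
  split_ifs <;> simp_all

-- ===== VERDICT (by name: the statement is the Claim_ definition above) =====
theorem detect_object_spec : Claim_equal_detect_object := by
  intro rects _ hpre
  obtain ⟨hne, hk, hlast⟩ := hpre
  obtain ⟨r, hl, hv⟩ := pvLastCenter_some rects none hne hk
  obtain ⟨hx, hy⟩ := hlast r (by simp [hl])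
  unfold Spec_detect_object detect_object detect_object_alt
  rw [hv]
  simpa using classify_eq _ _ hx hy
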